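-- pv_equiv track=rewrite | github.com/afifahfq/Tubes3Stima | src/MainRegex.py | changeEndline
-- ===== SOURCE A (Python) =====
-- def changeEndline(strin):
--     result = ""
--     for i in range(len(strin)):
--         if(strin[i] == "\n"):
--             if(i < len(strin)-1):
--                 result = result + "<br>"
--         else :
--             result = result + strin[i]
--     return result
-- ===== SOURCE B (Python) =====
-- def changeEndline(strin):
--     if strin.endswith("\n"):
--         strin = strin[:-1]
--     return strin.replace("\n", "<br>")
-- ===== Notes on version B (the rewrite author's own statement) =====
-- stated objective: simpler
-- what changed: Replaces the index-driven character loop (with a per-newline last-position test and quadratic string concatenation) by a two-step decomposition: strip one trailing newline with a slice, then uniformly replace every newline with <br> via str.replace.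
import Mathlib
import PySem

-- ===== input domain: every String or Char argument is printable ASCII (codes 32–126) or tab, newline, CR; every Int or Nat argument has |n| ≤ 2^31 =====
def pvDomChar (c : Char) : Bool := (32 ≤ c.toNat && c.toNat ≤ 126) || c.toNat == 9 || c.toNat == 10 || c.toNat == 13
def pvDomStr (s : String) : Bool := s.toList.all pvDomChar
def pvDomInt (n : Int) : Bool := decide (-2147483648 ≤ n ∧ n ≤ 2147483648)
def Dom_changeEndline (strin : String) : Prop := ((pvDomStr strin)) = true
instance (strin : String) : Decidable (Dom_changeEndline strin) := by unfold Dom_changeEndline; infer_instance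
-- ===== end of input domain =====

-- B replaces A's fused index loop (per-newline last-position test, quadratic string
-- concatenation) by: strip one trailing newline, then replace every '\n' with "<br>".

-- ===== PORT A =====
-- literal port of A: index loop over range(len(strin)), appending to a result accumulator
def changeEndline (strin : String) : String :=
  String.ofList <|
    (PySem.List.pyRange 0 (PySem.Str.len strin) 1).foldl
      (fun result i =>
        if PySem.List.pyGetD strin.toList i ' ' = '\n' then
          if i < PySem.Str.len strin - 1 then result ++ ['<', 'b', 'r', '>'] else result
        else result ++ [PySem.List.pyGetD strin.toList i ' '])
      []

-- ===== PORT B =====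
def changeEndline_alt (strin : String) : String :=
  let s := if PySem.Str.endswith strin "\n" then PySem.Str.slice strin none (some (-1)) else strin
  PySem.Str.replace s "\n" "<br>"

-- ===== PRECONDITION & SPEC =====
def Spec_changeEndline (strin : String) (out : String) : Prop := out = changeEndline_alt strin
instance (strin : String) (out : String) : Decidable (Spec_changeEndline strin out) := by unfold Spec_changeEndline; infer_instance

-- ===== CLAIM (what is proved, stated in full; the proofs are below) =====
def Claim_equal_changeEndline : Prop := ∀ (strin : String), Dom_changeEndline strin → Spec_changeEndline strin (changeEndline strin)

-- ===== LEMMAS AND PROOFS =====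

-- replacement of every '\n', one character at a time (proof-side spec shared by both sides)
def pvRepl : List Char → List Char
  | [] => []
  | c :: t => (if c = '\n' then ['<', 'b', 'r', '>'] else [c]) ++ pvRepl t

-- what A's loop produces: like pvRepl, but the last character, if '\n', is dropped
def pvOutA : List Char → List Char
  | [] => []
  | [c] => if c = '\n' then [] else [c]
  | c :: d :: t => (if c = '\n' then ['<', 'b', 'r', '>'] else [c]) ++ pvOutA (d :: t)

lemma pvGo_eq_pvRepl (fuel : Nat) : ∀ (l acc : List Char), l.length ≤ fuel →
    PySem.Chars.replace.go ['\n'] ['<', 'b', 'r', '>'] fuel l acc = acc.reverse ++ pvRepl l := by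
  induction fuel with
  | zero =>
    intro l acc h
    have : l = [] := List.eq_nil_of_length_eq_zero (Nat.le_zero.mp h)
    subst this
    simp [PySem.Chars.replace.go, pvRepl]
  | succ n ih =>
    intro l acc h
    cases l with
    | nil => simp [PySem.Chars.replace.go, pvRepl]
    | cons c t =>
      simp only [PySem.Chars.replace.go]
      by_cases hc : c = '\n'
      · subst hc
        have hp : List.isPrefixOf ['\n'] ('\n' :: t) = true := by
          simp [List.isPrefixOf]
        rw [if_pos hp]
        have := ih t (['>', 'r', 'b', '<'] ++ acc) (by simpa using Nat.le_of_succ_le_succ h)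
        simpa [pvRepl, this]
      · have hp : ¬ (List.isPrefixOf ['\n'] (c :: t) = true) := by
          simp [List.isPrefixOf]
          exact fun e => hc e.symm
        rw [if_neg hp]
        have := ih t (c :: acc) (by simpa using Nat.le_of_succ_le_succ h)
        simp [pvRepl, this, hc]

lemma pvReplace_eq_pvRepl (l : List Char) :
    PySem.Chars.replace l ['\n'] ['<', 'b', 'r', '>'] = pvRepl l := by
  simp only [PySem.Chars.replace, List.isEmpty]
  simpa using pvGo_eq_pvRepl l.length l [] le_rfl

lemma pvSuffix_cons_cons (c d : Char) (t : List Char) :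
    List.isSuffixOf ['\n'] (c :: d :: t) = List.isSuffixOf ['\n'] (d :: t) := by
  rw [Bool.eq_iff_iff]
  simp only [List.isSuffixOf_iff_suffix, List.suffix_cons_iff]
  constructor
  · rintro (h | h)
    · simp at h
    · exact h
  · intro h; exact Or.inr h

lemma pvOutA_eq (l : List Char) :
    pvOutA l = pvRepl (if PySem.Chars.endswith l ['\n'] then l.dropLast else l) := by
  induction l with
  | nil => simp [pvOutA, PySem.Chars.endswith, pvRepl]
  | cons c t ih =>
    cases t with
    | nil =>
      by_cases hc : c = '\n'
      · subst hc; simp [pvOutA, PySem.Chars.endswith, List.isSuffixOf, pvRepl]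
      · have h1 : ¬ (List.isSuffixOf ['\n'] [c] = true) := by
          simp [List.isSuffixOf]
          exact fun e => hc e.symm
        simp [pvOutA, PySem.Chars.endswith, h1, pvRepl, hc]
    | cons d t' =>
      simp only [pvOutA, PySem.Chars.endswith] at ih ⊢
      simp only [pvSuffix_cons_cons]
      by_cases hs : List.isSuffixOf ['\n'] (d :: t') = true
      · rw [if_pos hs] at ih ⊢
        have hne : (d :: t' : List Char) ≠ [] := by simp
        rw [List.dropLast_cons_of_ne_nil hne, pvRepl, ih]
      · rw [if_neg hs] at ih ⊢
        rw [pvRepl, ih]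

-- A's loop, read off the tail of the string starting at index k
lemma pvFoldA (full : List Char) : ∀ (n k : Nat) (acc : List Char), full.length - k = n →
    (PySem.List.pyRange (k : Int) (full.length : Int) 1).foldl
      (fun result i =>
        if PySem.List.pyGetD full i ' ' = '\n' then
          if i < (full.length : Int) - 1 then result ++ ['<', 'b', 'r', '>'] else result
        else result ++ [PySem.List.pyGetD full i ' '])
      acc = acc ++ pvOutA (full.drop k) := by
  intro n
  induction n with
  | zero =>
    intro k acc hn
    have hk : full.length ≤ k := by omega
    rw [PySem.List.pyRange_one_eq_nil (by exact_mod_cast hk)]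
    simp [List.drop_eq_nil_of_le hk, pvOutA]
  | succ n ih =>
    intro k acc hn
    have hk : k < full.length := by omega
    rw [PySem.List.pyRange_one_cons (by exact_mod_cast hk)]
    simp only [List.foldl_cons]
    have hget : PySem.List.pyGetD full (k : Int) ' ' = full[k] := by
      rw [PySem.List.pyGetD_natCast]
      simp [hk]
    have hdrop : full.drop k = full[k] :: full.drop (k + 1) := by
      rw [List.drop_eq_getElem_cons hk]
    have hrec := ih (k + 1) (if full[k] = '\n' then
          if (k : Int) < (full.length : Int) - 1 then acc ++ ['<', 'b', 'r', '>'] else acc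
        else acc ++ [full[k]]) (by omega)
    push_cast at hrec
    rw [hget, hrec, hdrop]
    by_cases hlast : k + 1 < full.length
    · have hcond : ((k : Int) < (full.length : Int) - 1) := by
        omega
      obtain ⟨d, t', hdt⟩ : ∃ d t', full.drop (k + 1) = d :: t' := by
        cases h' : full.drop (k + 1) with
        | nil => exact absurd (by simpa using List.drop_eq_nil_iff.mp h') (by omega)
        | cons d t' => exact ⟨d, t', rfl⟩
      rw [hdt]
      by_cases hc : full[k] = '\n' <;>
        simp [pvOutA, hc, hcond]
    · have hnil : full.drop (k + 1) = [] := List.drop_eq_nil_of_le (by omega)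
      have hcond : ¬ ((k : Int) < (full.length : Int) - 1) := by omega
      rw [hnil]
      by_cases hc : full[k] = '\n' <;>
        simp [pvOutA, hc, hcond]

-- ===== VERDICT (by name: the statement is the Claim_ definition above) =====
theorem changeEndline_spec : Claim_equal_changeEndline := by
  intro strin _
  show changeEndline strin = changeEndline_alt strin
  have hA : changeEndline strin = String.ofList (pvOutA strin.toList) := by
    unfold changeEndline
    have hlen : PySem.Str.len strin = (strin.toList.length : Int) := by
      simp
    rw [hlen]
    have h := pvFoldA strin.toList strin.toList.length 0 [] (by omega)
    simp only [Nat.cast_zero] at h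
    rw [h, List.nil_append, List.drop_zero]
  have hB : (changeEndline_alt strin).toList = pvOutA strin.toList := by
    unfold changeEndline_alt
    rw [PySem.Str.toList_replace, pvOutA_eq]
    by_cases h : PySem.Str.endswith strin "\n" = true
    · have h' : PySem.Chars.endswith strin.toList ['\n'] = true := by
        rw [show (['\n'] : List Char) = "\n".toList from rfl, ← PySem.Str.endswith_eq]
        exact h
      rw [if_pos h, if_pos h', PySem.Str.toList_slice,
        show PySem.Chars.slice strin.toList none (some (-1)) = strin.toList.dropLast from
          PySem.List.slice_to_neg_one _]
      exact pvReplace_eq_pvRepl _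
    · have h' : ¬ (PySem.Chars.endswith strin.toList ['\n'] = true) := by
        rw [show (['\n'] : List Char) = "\n".toList from rfl, ← PySem.Str.endswith_eq]
        exact h
      rw [if_neg h, if_neg h']
      exact pvReplace_eq_pvRepl _
  rw [hA, ← hB, String.ofList_toList]
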